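-- pv_equiv track=rewrite | github.com/IMPACT750/2Algo | Algo.py | parcours_optimal_bottom_up
-- ===== SOURCE A (Python) =====
-- def parcours_optimal_bottom_up(T, C, A, B):
--     n = len(T)
--     memo = [0] * n
--     indices = []
--
--     memo[0] = B * T[0]
--     indices.append(0)
--
--     for i in range(1, n):
--         max_gain = memo[i - 1]
--         visit_index = -1
--         for j in range(i):
--             if C[i] == C[j]:
--                 gain = memo[j] + A * T[i]
--             else:
--                 gain = memo[j] + B * T[i]
--             if gain > max_gain:
--                 max_gain = gain
--                 visit_index = j
--
--         if visit_index != -1: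
--             memo[i] = max_gain
--             indices.append(i)
--         else:
--             memo[i] = memo[i - 1]
--
--     return memo[-1], indices
-- ===== SOURCE B (Python) =====
-- def parcours_optimal_bottom_up(T, C, A, B):
--     # O(n): per-color running max of memo, plus the best and second-best
--     # (distinct-color) maxima, give the best predecessor gain in O(1) per step.
--     n = len(T)
--     prev = B * T[0]                 # memo value of the previous index
--     indices = [0]
--     colormax = {C[0]: prev}         # color -> max memo value among that color
--     c1, v1 = C[0], prev             # color with the largest colormax value, and that value
--     v2 = None                       # largest colormax value among colors != c1 (None if none)
--     for i in range(1, n):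
--         ti, ci = T[i], C[i]
--         cand = None                 # best gain over all predecessors
--         if ci in colormax:
--             cand = colormax[ci] + A * ti
--         if ci != c1:
--             d = v1 + B * ti
--             if cand is None or d > cand:
--                 cand = d
--         elif v2 is not None:
--             d = v2 + B * ti
--             if cand is None or d > cand:
--                 cand = d
--         if cand is not None and cand > prev:
--             cur = cand
--             indices.append(i)
--         else:
--             cur = prev
--         old = colormax.get(ci)
--         if old is None or cur > old:
--             colormax[ci] = cur
--             if ci == c1:
--                 v1 = cur
--             elif cur > v1:
--                 c1, v1, v2 = ci, cur, v1
--             elif v2 is None or cur > v2: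
--                 v2 = cur
--         prev = cur
--     return prev, indices
-- ===== Notes on version B (the rewrite author's own statement) =====
-- stated objective: faster
-- what changed: Replaced the O(n^2) inner scan over all predecessors by a per-color running-maximum dictionary plus the top-two distinct-color maxima, giving the best gain in O(1) per index.
-- outside the precondition, e.g. on parcours_optimal_bottom_up([-1], [], 2, 5): A returns (-5, [0]), B raises IndexError
import Mathlib
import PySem

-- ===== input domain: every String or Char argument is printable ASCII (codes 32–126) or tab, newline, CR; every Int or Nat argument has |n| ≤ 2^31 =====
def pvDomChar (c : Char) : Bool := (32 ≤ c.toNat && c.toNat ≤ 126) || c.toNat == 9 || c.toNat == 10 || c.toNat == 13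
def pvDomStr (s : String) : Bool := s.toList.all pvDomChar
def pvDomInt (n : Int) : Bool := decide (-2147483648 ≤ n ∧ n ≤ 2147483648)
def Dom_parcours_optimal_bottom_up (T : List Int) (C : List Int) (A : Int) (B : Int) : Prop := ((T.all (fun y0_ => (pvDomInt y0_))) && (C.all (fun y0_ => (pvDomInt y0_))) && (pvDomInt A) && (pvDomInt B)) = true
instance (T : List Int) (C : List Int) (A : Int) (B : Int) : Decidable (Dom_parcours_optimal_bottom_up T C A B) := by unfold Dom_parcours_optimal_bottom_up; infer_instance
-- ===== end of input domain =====

-- B replaces A's O(n^2) inner scan over all predecessors by a per-color running-max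
-- dictionary plus the top-two distinct-color maxima; return values proved equal on Pre_.

-- ===== PORT A =====
-- gain = memo[j] + (A if C[i] == C[j] else B) * T[i]
def pobuGain (C memo : List Int) (ci ti Aco Bco : Int) (j : Int) : Int :=
  if ci == PySem.List.pyGetD C j 0 then PySem.List.pyGetD memo j 0 + Aco * ti
  else PySem.List.pyGetD memo j 0 + Bco * ti

-- inner loop 'for j in range(i)' tracking (max_gain, visit_index)
def pobuInner (T C memo : List Int) (Aco Bco i prev : Int) : Int × Int :=
  (PySem.List.pyRange 0 i 1).foldl
    (fun (mv : Int × Int) j =>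
      let gain := pobuGain C memo (PySem.List.pyGetD C i 0) (PySem.List.pyGetD T i 0) Aco Bco j
      if gain > mv.1 then (gain, j) else mv) (prev, -1)

-- one iteration of the outer loop; Python's memo = [0]*n is filled left to right and only
-- filled slots (j < i) are ever read, so it is modelled as the growing list of filled entries.
def pobuStepA (T C : List Int) (Aco Bco : Int) (st : List Int × List Int) (i : Int) :
    List Int × List Int :=
  let memo := st.1
  let prev := PySem.List.pyGetD memo (i - 1) 0
  let inner := pobuInner T C memo Aco Bco i prev
  if inner.2 ≠ -1 then (memo ++ [inner.1], st.2 ++ [i]) else (memo ++ [prev], st.2)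

def parcours_optimal_bottom_up (T : List Int) (C : List Int) (A : Int) (B : Int) : Int × List Int :=
  let n := PySem.List.len T
  let st := (PySem.List.pyRange 1 n 1).foldl (pobuStepA T C A B)
      ([B * PySem.List.pyGetD T 0 0], [0])
  (PySem.List.pyGetD st.1 (-1) 0, st.2)

-- ===== PORT B =====
-- best candidate gain: same-color via colormax[ci], different-color via the top-two maxima
def pobuCand (cm : PySem.Dict Int Int) (c1 v1 : Int) (v2 : Option Int) (ci ti Aco Bco : Int) :
    Option Int :=
  let cand0 : Option Int := if cm.contains ci then some (cm.getD ci 0 + Aco * ti) else none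
  if ci ≠ c1 then
    match cand0 with
    | none => some (v1 + Bco * ti)
    | some cv => if v1 + Bco * ti > cv then some (v1 + Bco * ti) else some cv
  else
    match v2 with
    | none => cand0
    | some w =>
      match cand0 with
      | none => some (w + Bco * ti)
      | some cv => if w + Bco * ti > cv then some (w + Bco * ti) else some cv

-- update colormax and the top-two (c1,v1 = best color/value, v2 = best value of other colors)
def pobuTop (cm : PySem.Dict Int Int) (c1 v1 : Int) (v2 : Option Int) (ci cur : Int) :
    PySem.Dict Int Int × Int × Int × Option Int :=
  -- Option.elim mirrors Python's "old is None or cur > old" and "v2 is None or cur > v2"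
  let upd : Bool := (cm.get? ci).elim true (fun o => decide (cur > o))
  if upd then
    (cm.insert ci cur,
     if ci = c1 then (c1, cur, v2)
     else if cur > v1 then (ci, cur, some v1)
     else (c1, v1, some (v2.elim cur (fun w => if cur > w then cur else w))))
  else (cm, c1, v1, v2)

-- state: (prev, indices, colormax, c1, v1, v2)
def pobuStepB (T C : List Int) (Aco Bco : Int)
    (st : Int × List Int × PySem.Dict Int Int × Int × Int × Option Int) (i : Int) :
    Int × List Int × PySem.Dict Int Int × Int × Int × Option Int :=
  let ti := PySem.List.pyGetD T i 0
  let ci := PySem.List.pyGetD C i 0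
  let cand := pobuCand st.2.2.1 st.2.2.2.1 st.2.2.2.2.1 st.2.2.2.2.2 ci ti Aco Bco
  let cur := match cand with | some cv => if cv > st.1 then cv else st.1 | none => st.1
  let indices' := match cand with | some cv => if cv > st.1 then st.2.1 ++ [i] else st.2.1 | none => st.2.1
  (cur, indices', pobuTop st.2.2.1 st.2.2.2.1 st.2.2.2.2.1 st.2.2.2.2.2 ci cur)

def parcours_optimal_bottom_up_alt (T : List Int) (C : List Int) (A : Int) (B : Int) : Int × List Int :=
  let n := PySem.List.len T
  let p0 := B * PySem.List.pyGetD T 0 0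
  let c0 := PySem.List.pyGetD C 0 0
  let st := (PySem.List.pyRange 1 n 1).foldl (pobuStepB T C A B)
      (p0, [0], ((PySem.Dict.empty : PySem.Dict Int Int).insert c0 p0), c0, p0, none)
  (st.1, st.2.1)

-- ===== PRECONDITION & SPEC =====
-- Pre_ excludes empty T and C shorter than T: there Python A raises IndexError, except in the
-- one corner len(T) = 1 with C shorter, where A never touches C and returns while B's own
-- initial C[0] read raises IndexError, so that corner stays excluded too.
def Pre_parcours_optimal_bottom_up (T : List Int) (C : List Int) (A : Int) (B : Int) : Prop :=
  T ≠ [] ∧ T.length ≤ C.length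
instance (T : List Int) (C : List Int) (A : Int) (B : Int) : Decidable (Pre_parcours_optimal_bottom_up T C A B) := by unfold Pre_parcours_optimal_bottom_up; infer_instance

def pvWitness_parcours_optimal_bottom_up : List Int × List Int × Int × Int :=
  ([2, 3, 1], [0, 1, 0], 2, 1)

def Spec_parcours_optimal_bottom_up (T : List Int) (C : List Int) (A : Int) (B : Int) (out : Int × List Int) : Prop := out = parcours_optimal_bottom_up_alt T C A B
instance (T : List Int) (C : List Int) (A : Int) (B : Int) (out : Int × List Int) : Decidable (Spec_parcours_optimal_bottom_up T C A B out) := by unfold Spec_parcours_optimal_bottom_up; infer_instance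

-- ===== CLAIM (what is proved, stated in full; the proofs are below) =====
def Claim_equal_parcours_optimal_bottom_up : Prop := ∀ (T : List Int) (C : List Int) (A : Int) (B : Int), Dom_parcours_optimal_bottom_up T C A B → Pre_parcours_optimal_bottom_up T C A B → Spec_parcours_optimal_bottom_up T C A B (parcours_optimal_bottom_up T C A B)

-- ===== LEMMAS AND PROOFS =====

lemma pyGetD_append_keep (xs ys : List Int) (j : Int) (h0 : 0 ≤ j) (h : j < (xs.length : Int)) :
    PySem.List.pyGetD (xs ++ ys) j 0 = PySem.List.pyGetD xs j 0 := by
  have hj : j = ((j.toNat : Nat) : Int) := by omega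
  rw [hj, PySem.List.pyGetD_natCast, PySem.List.pyGetD_natCast]
  exact List.getD_append xs ys 0 j.toNat (by omega)

lemma pyGetD_append_last (xs : List Int) (x : Int) :
    PySem.List.pyGetD (xs ++ [x]) ((xs.length : Nat) : Int) 0 = x := by
  rw [PySem.List.pyGetD_natCast, List.getD_eq_getElem?_getD,
    List.getElem?_append_right (Nat.le_refl _)]
  simp

lemma pobu_inner_fst (g : Int → Int) (js : List Int) : ∀ (mg vi : Int),
    (js.foldl (fun (mv : Int × Int) j => if g j > mv.1 then (g j, j) else mv) (mg, vi)).1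
      = js.foldl (fun m j => max m (g j)) mg := by
  induction js with
  | nil => intro mg vi; rfl
  | cons j js ih =>
    intro mg vi
    simp only [List.foldl_cons]
    by_cases h : g j > mg
    · rw [if_pos h, ih, Int.max_eq_right h.le]
    · rw [if_neg h, ih, Int.max_eq_left (by omega)]

lemma pobu_inner_snd (g : Int → Int) (js : List Int) : (∀ j ∈ js, 0 ≤ j) → ∀ (mg vi : Int),
    ((js.foldl (fun (mv : Int × Int) j => if g j > mv.1 then (g j, j) else mv) (mg, vi)).2 = -1
      ↔ (vi = -1 ∧ ∀ j ∈ js, g j ≤ mg)) := by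
  induction js with
  | nil => intro _ mg vi; simp
  | cons j js ih =>
    intro hjs mg vi
    have hj0 : 0 ≤ j := hjs j (by simp)
    have hjs' : ∀ x ∈ js, 0 ≤ x := fun x hx => hjs x (List.mem_cons_of_mem _ hx)
    simp only [List.foldl_cons]
    by_cases h : g j > mg
    · rw [if_pos h, ih hjs' (g j) j]
      constructor
      · rintro ⟨h1, -⟩; exact absurd h1 (by omega)
      · rintro ⟨-, hall⟩; exact absurd (hall j (by simp)) (by omega)
    · rw [if_neg h, ih hjs' mg vi]
      constructor
      · rintro ⟨h1, h2⟩
        refine ⟨h1, ?_⟩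
        intro x hx
        rcases List.mem_cons.mp hx with rfl | hx'
        · omega
        · exact h2 x hx'
      · rintro ⟨h1, h2⟩
        exact ⟨h1, fun x hx => h2 x (List.mem_cons_of_mem _ hx)⟩

lemma pobu_foldl_max_eq (l : List Int) (a x : Int) (hax : a ≤ x)
    (hub : ∀ y ∈ l, y ≤ x) (hat : x = a ∨ x ∈ l) : l.foldl max a = x := by
  obtain ⟨h1, h2⟩ := PySem.List.le_foldl_max l a
  rcases PySem.List.foldl_max_mem l a with hm | hm
  · rcases hat with rfl | hx
    · exact hm
    · have hxa : x ≤ a := hm ▸ h2 x hx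
      omega
  · have hf_le : l.foldl max a ≤ x := hub _ hm
    have hx_le : x ≤ l.foldl max a := by
      rcases hat with rfl | hx
      · exact h1
      · exact h2 x hx
    omega

lemma pobu_inner_eq (T C memo : List Int) (Aco Bco i prev : Int) :
    (pobuInner T C memo Aco Bco i prev).1
      = ((PySem.List.pyRange 0 i 1).map
          (pobuGain C memo (PySem.List.pyGetD C i 0) (PySem.List.pyGetD T i 0) Aco Bco)).foldl max prev
    ∧ ((pobuInner T C memo Aco Bco i prev).2 = -1
      ↔ ∀ j ∈ PySem.List.pyRange 0 i 1,
          pobuGain C memo (PySem.List.pyGetD C i 0) (PySem.List.pyGetD T i 0) Aco Bco j ≤ prev) := by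
  constructor
  · rw [List.foldl_map]
    exact pobu_inner_fst _ _ _ _
  · rw [show (pobuInner T C memo Aco Bco i prev).2
        = ((PySem.List.pyRange 0 i 1).foldl
            (fun (mv : Int × Int) j =>
              if pobuGain C memo (PySem.List.pyGetD C i 0) (PySem.List.pyGetD T i 0) Aco Bco j > mv.1
              then (pobuGain C memo (PySem.List.pyGetD C i 0) (PySem.List.pyGetD T i 0) Aco Bco j, j)
              else mv) (prev, -1)).2 from rfl]
    rw [pobu_inner_snd _ _ (fun j hj => (PySem.List.mem_pyRange_one.mp hj).1) prev (-1)]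
    simp

-- the simulation invariant between A's state (memo, indices) and B's state
-- (prev, indices, colormax, c1, v1, v2) after processing indices 1..k
def pobuInv (C : List Int) (k : Nat) (sa : List Int × List Int)
    (sb : Int × List Int × PySem.Dict Int Int × Int × Int × Option Int) : Prop :=
  sa.1.length = k + 1 ∧
  sa.2 = sb.2.1 ∧
  sb.1 = PySem.List.pyGetD sa.1 (k : Int) 0 ∧
  (∀ j : Int, 0 ≤ j → j ≤ (k : Int) → PySem.List.pyGetD sa.1 j 0 ≤ sb.1) ∧
  (∀ c v, sb.2.2.1.get? c = some v →
    (∃ j : Int, 0 ≤ j ∧ j ≤ (k : Int) ∧ PySem.List.pyGetD C j 0 = c ∧ PySem.List.pyGetD sa.1 j 0 = v) ∧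
    (∀ j : Int, 0 ≤ j → j ≤ (k : Int) → PySem.List.pyGetD C j 0 = c → PySem.List.pyGetD sa.1 j 0 ≤ v)) ∧
  (∀ c, sb.2.2.1.get? c = none → ∀ j : Int, 0 ≤ j → j ≤ (k : Int) → PySem.List.pyGetD C j 0 ≠ c) ∧
  sb.2.2.1.get? sb.2.2.2.1 = some sb.2.2.2.2.1 ∧
  (∀ c v, sb.2.2.1.get? c = some v → v ≤ sb.2.2.2.2.1) ∧
  (∀ w, sb.2.2.2.2.2 = some w →
    (∃ c, c ≠ sb.2.2.2.1 ∧ sb.2.2.1.get? c = some w) ∧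
    (∀ c v, c ≠ sb.2.2.2.1 → sb.2.2.1.get? c = some v → v ≤ w)) ∧
  (sb.2.2.2.2.2 = none → ∀ c, c ≠ sb.2.2.2.1 → sb.2.2.1.get? c = none)

lemma pobu_cand_spec (C memo : List Int) (Aco Bco : Int) (k : Nat)
    (cm : PySem.Dict Int Int) (c1 v1 : Int) (v2 : Option Int) (ci ti : Int)
    (hclsS : ∀ c v, cm.get? c = some v →
      (∃ j : Int, 0 ≤ j ∧ j ≤ (k:Int) ∧ PySem.List.pyGetD C j 0 = c ∧ PySem.List.pyGetD memo j 0 = v) ∧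
      (∀ j : Int, 0 ≤ j → j ≤ (k:Int) → PySem.List.pyGetD C j 0 = c → PySem.List.pyGetD memo j 0 ≤ v))
    (hclsN : ∀ c, cm.get? c = none → ∀ j : Int, 0 ≤ j → j ≤ (k:Int) → PySem.List.pyGetD C j 0 ≠ c)
    (hc1 : cm.get? c1 = some v1)
    (hv1 : ∀ c v, cm.get? c = some v → v ≤ v1)
    (hv2S : ∀ w, v2 = some w →
      (∃ c, c ≠ c1 ∧ cm.get? c = some w) ∧ (∀ c v, c ≠ c1 → cm.get? c = some v → v ≤ w))
    (hv2N : v2 = none → ∀ c, c ≠ c1 → cm.get? c = none) :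
    ∃ cv, pobuCand cm c1 v1 v2 ci ti Aco Bco = some cv ∧
      (∀ j : Int, 0 ≤ j → j ≤ (k:Int) → pobuGain C memo ci ti Aco Bco j ≤ cv) ∧
      (∃ j : Int, 0 ≤ j ∧ j ≤ (k:Int) ∧ pobuGain C memo ci ti Aco Bco j = cv) := by
  have class_some : ∀ j : Int, 0 ≤ j → j ≤ (k:Int) →
      ∃ vj, cm.get? (PySem.List.pyGetD C j 0) = some vj ∧ PySem.List.pyGetD memo j 0 ≤ vj := by
    intro j h0 hk
    cases hq : cm.get? (PySem.List.pyGetD C j 0) with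
    | none => exact absurd rfl (hclsN _ hq j h0 hk)
    | some vj => exact ⟨vj, rfl, (hclsS _ _ hq).2 j h0 hk rfl⟩
  have g_att_same : ∀ o, cm.get? ci = some o →
      ∃ j : Int, 0 ≤ j ∧ j ≤ (k:Int) ∧ pobuGain C memo ci ti Aco Bco j = o + Aco * ti := by
    intro o ho
    obtain ⟨⟨j, hj0, hjk, hcj, hmj⟩, -⟩ := hclsS ci o ho
    exact ⟨j, hj0, hjk, by simp [pobuGain, hcj, hmj]⟩
  have g_att_diff : ∀ c o, c ≠ ci → cm.get? c = some o →
      ∃ j : Int, 0 ≤ j ∧ j ≤ (k:Int) ∧ pobuGain C memo ci ti Aco Bco j = o + Bco * ti := by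
    intro c o hne ho
    obtain ⟨⟨j, hj0, hjk, hcj, hmj⟩, -⟩ := hclsS c o ho
    refine ⟨j, hj0, hjk, ?_⟩
    have hbe : (ci == PySem.List.pyGetD C j 0) = false := by
      rw [hcj]; exact beq_eq_false_iff_ne.mpr (fun hh => hne hh.symm)
    simp [pobuGain, hbe, hmj]
  have g_ub_same : ∀ o, cm.get? ci = some o → ∀ j : Int, 0 ≤ j → j ≤ (k:Int) →
      PySem.List.pyGetD C j 0 = ci → pobuGain C memo ci ti Aco Bco j ≤ o + Aco * ti := by
    intro o ho j h0 hk hcj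
    have hle := (hclsS ci o ho).2 j h0 hk hcj
    simp [pobuGain, hcj]
    omega
  have g_ub_diff_v1 : ∀ j : Int, 0 ≤ j → j ≤ (k:Int) →
      PySem.List.pyGetD C j 0 ≠ ci → pobuGain C memo ci ti Aco Bco j ≤ v1 + Bco * ti := by
    intro j h0 hk hcj
    obtain ⟨vj, hq, hle⟩ := class_some j h0 hk
    have hv := hv1 _ _ hq
    have hbe : (ci == PySem.List.pyGetD C j 0) = false :=
      beq_eq_false_iff_ne.mpr (fun hh => hcj hh.symm)
    simp [pobuGain, hbe]
    omega
  have g_ub_diff_v2 : ∀ w, v2 = some w → ci = c1 → ∀ j : Int, 0 ≤ j → j ≤ (k:Int) →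
      PySem.List.pyGetD C j 0 ≠ ci → pobuGain C memo ci ti Aco Bco j ≤ w + Bco * ti := by
    intro w hw hcic1 j h0 hk hcj
    obtain ⟨vj, hq, hle⟩ := class_some j h0 hk
    have hv := (hv2S w hw).2 _ _ (by rw [← hcic1]; exact hcj) hq
    have hbe : (ci == PySem.List.pyGetD C j 0) = false :=
      beq_eq_false_iff_ne.mpr (fun hh => hcj hh.symm)
    simp [pobuGain, hbe]
    omega
  have hcontT : ∀ o, cm.get? ci = some o → cm.contains ci = true := by
    intro o h; rw [PySem.Dict.contains_eq_isSome_get?, h]; rfl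
  have hcontF : cm.get? ci = none → cm.contains ci = false := by
    intro h; rw [PySem.Dict.contains_eq_isSome_get?, h]; rfl
  by_cases hne : ci = c1
  · have hget : cm.get? ci = some v1 := by rw [hne]; exact hc1
    have hgd : cm.getD ci 0 = v1 := PySem.Dict.getD_of_get?_eq_some cm 0 hget
    have hcontt := hcontT v1 hget
    rcases hv2e : v2 with _ | w
    · subst hv2e
      refine ⟨v1 + Aco * ti, ?_, ?_, g_att_same v1 hget⟩
      · unfold pobuCand
        rw [if_neg (show ¬(ci ≠ c1) from fun h => h hne)]
        simp [hcontt, hgd]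
      · intro j hj0 hjk
        by_cases hcj : PySem.List.pyGetD C j 0 = ci
        · exact g_ub_same v1 hget j hj0 hjk hcj
        · exfalso
          obtain ⟨vj, hq, -⟩ := class_some j hj0 hjk
          have := hv2N rfl (PySem.List.pyGetD C j 0) (by rw [← hne]; exact hcj)
          rw [this] at hq
          simp at hq
    · subst hv2e
      by_cases hd : w + Bco * ti > v1 + Aco * ti
      · refine ⟨w + Bco * ti, ?_, ?_, ?_⟩
        · unfold pobuCand
          rw [if_neg (show ¬(ci ≠ c1) from fun h => h hne)]
          simp [hcontt, hgd, hd]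
        · intro j hj0 hjk
          by_cases hcj : PySem.List.pyGetD C j 0 = ci
          · have := g_ub_same v1 hget j hj0 hjk hcj; omega
          · exact g_ub_diff_v2 w rfl hne j hj0 hjk hcj
        · obtain ⟨⟨c, hcne, hcw⟩, -⟩ := hv2S w rfl
          exact g_att_diff c w (by rw [hne]; exact hcne) hcw
      · refine ⟨v1 + Aco * ti, ?_, ?_, g_att_same v1 hget⟩
        · unfold pobuCand
          rw [if_neg (show ¬(ci ≠ c1) from fun h => h hne)]
          simp [hcontt, hgd, hd]
        · intro j hj0 hjk
          by_cases hcj : PySem.List.pyGetD C j 0 = ci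
          · exact g_ub_same v1 hget j hj0 hjk hcj
          · have := g_ub_diff_v2 w rfl hne j hj0 hjk hcj; omega
  · have hc1ci : c1 ≠ ci := fun h => hne h.symm
    rcases hget : cm.get? ci with _ | o
    · refine ⟨v1 + Bco * ti, ?_, ?_, g_att_diff c1 v1 hc1ci hc1⟩
      · unfold pobuCand
        rw [if_pos hne]
        simp [hcontF hget]
      · intro j hj0 hjk
        by_cases hcj : PySem.List.pyGetD C j 0 = ci
        · exact absurd hcj (hclsN ci hget j hj0 hjk)
        · exact g_ub_diff_v1 j hj0 hjk hcj
    · have hgd : cm.getD ci 0 = o := PySem.Dict.getD_of_get?_eq_some cm 0 hget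
      have hcontt := hcontT o hget
      by_cases hd : v1 + Bco * ti > o + Aco * ti
      · refine ⟨v1 + Bco * ti, ?_, ?_, g_att_diff c1 v1 hc1ci hc1⟩
        · unfold pobuCand
          rw [if_pos hne]
          simp [hcontt, hgd, hd]
        · intro j hj0 hjk
          by_cases hcj : PySem.List.pyGetD C j 0 = ci
          · have := g_ub_same o hget j hj0 hjk hcj; omega
          · exact g_ub_diff_v1 j hj0 hjk hcj
      · refine ⟨o + Aco * ti, ?_, ?_, g_att_same o hget⟩
        · unfold pobuCand
          rw [if_pos hne]
          simp [hcontt, hgd, hd]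
        · intro j hj0 hjk
          by_cases hcj : PySem.List.pyGetD C j 0 = ci
          · exact g_ub_same o hget j hj0 hjk hcj
          · have := g_ub_diff_v1 j hj0 hjk hcj; omega

lemma pobu_top_spec (C memo : List Int) (cm : PySem.Dict Int Int) (c1 v1 : Int) (v2 : Option Int)
    (ci cur : Int) (k : Nat) (prev : Int)
    (hlen : memo.length = k + 1)
    (hmono : ∀ j : Int, 0 ≤ j → j ≤ (k:Int) → PySem.List.pyGetD memo j 0 ≤ prev)
    (hclsS : ∀ c v, cm.get? c = some v →
      (∃ j : Int, 0 ≤ j ∧ j ≤ (k:Int) ∧ PySem.List.pyGetD C j 0 = c ∧ PySem.List.pyGetD memo j 0 = v) ∧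
      (∀ j : Int, 0 ≤ j → j ≤ (k:Int) → PySem.List.pyGetD C j 0 = c → PySem.List.pyGetD memo j 0 ≤ v))
    (hclsN : ∀ c, cm.get? c = none → ∀ j : Int, 0 ≤ j → j ≤ (k:Int) → PySem.List.pyGetD C j 0 ≠ c)
    (hc1 : cm.get? c1 = some v1)
    (hv1 : ∀ c v, cm.get? c = some v → v ≤ v1)
    (hv2S : ∀ w, v2 = some w →
      (∃ c, c ≠ c1 ∧ cm.get? c = some w) ∧ (∀ c v, c ≠ c1 → cm.get? c = some v → v ≤ w))
    (hv2N : v2 = none → ∀ c, c ≠ c1 → cm.get? c = none)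
    (hpc : prev ≤ cur)
    (hciC : PySem.List.pyGetD C ((k:Int) + 1) 0 = ci) :
    (∀ c v, (pobuTop cm c1 v1 v2 ci cur).1.get? c = some v →
      (∃ j : Int, 0 ≤ j ∧ j ≤ (k:Int) + 1 ∧ PySem.List.pyGetD C j 0 = c ∧
        PySem.List.pyGetD (memo ++ [cur]) j 0 = v) ∧
      (∀ j : Int, 0 ≤ j → j ≤ (k:Int) + 1 → PySem.List.pyGetD C j 0 = c →
        PySem.List.pyGetD (memo ++ [cur]) j 0 ≤ v)) ∧
    (∀ c, (pobuTop cm c1 v1 v2 ci cur).1.get? c = none →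
      ∀ j : Int, 0 ≤ j → j ≤ (k:Int) + 1 → PySem.List.pyGetD C j 0 ≠ c) ∧
    (pobuTop cm c1 v1 v2 ci cur).1.get? (pobuTop cm c1 v1 v2 ci cur).2.1
      = some (pobuTop cm c1 v1 v2 ci cur).2.2.1 ∧
    (∀ c v, (pobuTop cm c1 v1 v2 ci cur).1.get? c = some v → v ≤ (pobuTop cm c1 v1 v2 ci cur).2.2.1) ∧
    (∀ w, (pobuTop cm c1 v1 v2 ci cur).2.2.2 = some w →
      (∃ c, c ≠ (pobuTop cm c1 v1 v2 ci cur).2.1 ∧ (pobuTop cm c1 v1 v2 ci cur).1.get? c = some w) ∧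
      (∀ c v, c ≠ (pobuTop cm c1 v1 v2 ci cur).2.1 →
        (pobuTop cm c1 v1 v2 ci cur).1.get? c = some v → v ≤ w)) ∧
    ((pobuTop cm c1 v1 v2 ci cur).2.2.2 = none →
      ∀ c, c ≠ (pobuTop cm c1 v1 v2 ci cur).2.1 → (pobuTop cm c1 v1 v2 ci cur).1.get? c = none) := by
  have hkeep : ∀ j : Int, 0 ≤ j → j ≤ (k:Int) →
      PySem.List.pyGetD (memo ++ [cur]) j 0 = PySem.List.pyGetD memo j 0 := by
    intro j h0 hk
    exact pyGetD_append_keep memo [cur] j h0 (by omega)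
  have hnewv : PySem.List.pyGetD (memo ++ [cur]) ((k:Int) + 1) 0 = cur := by
    have h2 : ((k:Int) + 1) = ((memo.length : Nat) : Int) := by omega
    rw [h2, pyGetD_append_last]
  have hvp : ∀ c v, cm.get? c = some v → v ≤ cur := by
    intro c v h
    obtain ⟨⟨j, hj0, hjk, -, hmj⟩, -⟩ := hclsS c v h
    rw [← hmj]
    exact le_trans (hmono j hj0 hjk) hpc
  have hclsS' : (∀ j : Int, 0 ≤ j → j ≤ (k:Int) → PySem.List.pyGetD C j 0 = ci →
        PySem.List.pyGetD memo j 0 ≤ cur) →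
      ∀ c v, (cm.insert ci cur).get? c = some v →
      (∃ j : Int, 0 ≤ j ∧ j ≤ (k:Int) + 1 ∧ PySem.List.pyGetD C j 0 = c ∧
        PySem.List.pyGetD (memo ++ [cur]) j 0 = v) ∧
      (∀ j : Int, 0 ≤ j → j ≤ (k:Int) + 1 → PySem.List.pyGetD C j 0 = c →
        PySem.List.pyGetD (memo ++ [cur]) j 0 ≤ v) := by
    intro hub_ci c v hv
    rw [PySem.Dict.get?_insert] at hv
    by_cases hcc : c = ci
    · rw [if_pos hcc] at hv
      injection hv with hveq
      subst hveq
      constructor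
      · exact ⟨(k:Int) + 1, by omega, le_refl _, by rw [hcc]; exact hciC, hnewv⟩
      · intro j hj0 hjk hcj
        rcases (by omega : j ≤ (k:Int) ∨ j = (k:Int) + 1) with hj | hj
        · rw [hkeep j hj0 hj]
          exact hub_ci j hj0 hj (hcj.trans hcc)
        · rw [hj, hnewv]
    · rw [if_neg hcc] at hv
      obtain ⟨⟨j, hj0, hjk, hcj, hmj⟩, hubold⟩ := hclsS c v hv
      constructor
      · exact ⟨j, hj0, by omega, hcj, by rw [hkeep j hj0 hjk]; exact hmj⟩
      · intro j hj0 hjk1 hcj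
        rcases (by omega : j ≤ (k:Int) ∨ j = (k:Int) + 1) with hj | hj
        · rw [hkeep j hj0 hj]
          exact hubold j hj0 hj hcj
        · exfalso
          rw [hj, hciC] at hcj
          exact hcc hcj.symm
  have hclsN' : ∀ c, (cm.insert ci cur).get? c = none →
      ∀ j : Int, 0 ≤ j → j ≤ (k:Int) + 1 → PySem.List.pyGetD C j 0 ≠ c := by
    intro c hnone j hj0 hjk
    rw [PySem.Dict.get?_insert] at hnone
    by_cases hcc : c = ci
    · rw [if_pos hcc] at hnone
      exact absurd hnone (by simp)
    · rw [if_neg hcc] at hnone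
      rcases (by omega : j ≤ (k:Int) ∨ j = (k:Int) + 1) with hj | hj
      · exact hclsN c hnone j hj0 hj
      · rw [hj, hciC]
        exact fun h => hcc h.symm
  have main_ins : (((cm.get? ci).elim true (fun o => decide (cur > o)) : Bool) = true) →
      (∀ j : Int, 0 ≤ j → j ≤ (k:Int) → PySem.List.pyGetD C j 0 = ci →
        PySem.List.pyGetD memo j 0 ≤ cur) →
      (∀ o', cm.get? ci = some o' → o' < cur) →
      (∀ c v, (pobuTop cm c1 v1 v2 ci cur).1.get? c = some v →
        (∃ j : Int, 0 ≤ j ∧ j ≤ (k:Int) + 1 ∧ PySem.List.pyGetD C j 0 = c ∧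
          PySem.List.pyGetD (memo ++ [cur]) j 0 = v) ∧
        (∀ j : Int, 0 ≤ j → j ≤ (k:Int) + 1 → PySem.List.pyGetD C j 0 = c →
          PySem.List.pyGetD (memo ++ [cur]) j 0 ≤ v)) ∧
      (∀ c, (pobuTop cm c1 v1 v2 ci cur).1.get? c = none →
        ∀ j : Int, 0 ≤ j → j ≤ (k:Int) + 1 → PySem.List.pyGetD C j 0 ≠ c) ∧
      (pobuTop cm c1 v1 v2 ci cur).1.get? (pobuTop cm c1 v1 v2 ci cur).2.1
        = some (pobuTop cm c1 v1 v2 ci cur).2.2.1 ∧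
      (∀ c v, (pobuTop cm c1 v1 v2 ci cur).1.get? c = some v →
        v ≤ (pobuTop cm c1 v1 v2 ci cur).2.2.1) ∧
      (∀ w, (pobuTop cm c1 v1 v2 ci cur).2.2.2 = some w →
        (∃ c, c ≠ (pobuTop cm c1 v1 v2 ci cur).2.1 ∧ (pobuTop cm c1 v1 v2 ci cur).1.get? c = some w) ∧
        (∀ c v, c ≠ (pobuTop cm c1 v1 v2 ci cur).2.1 →
          (pobuTop cm c1 v1 v2 ci cur).1.get? c = some v → v ≤ w)) ∧
      ((pobuTop cm c1 v1 v2 ci cur).2.2.2 = none →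
        ∀ c, c ≠ (pobuTop cm c1 v1 v2 ci cur).2.1 → (pobuTop cm c1 v1 v2 ci cur).1.get? c = none) := by
    intro hup hub_ci hci_lt
    have hr : pobuTop cm c1 v1 v2 ci cur = (cm.insert ci cur,
        if ci = c1 then (c1, cur, v2)
        else if cur > v1 then (ci, cur, some v1)
        else (c1, v1, some (v2.elim cur (fun w => if cur > w then cur else w)))) := by
      unfold pobuTop
      rw [hup]
      simp
    rw [hr]
    by_cases hc1e : ci = c1
    · subst hc1e
      rw [if_pos rfl]
      dsimp only
      refine ⟨hclsS' hub_ci, hclsN', ?_, ?_, ?_, ?_⟩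
      · rw [PySem.Dict.get?_insert_self]
      · intro c v hv
        rw [PySem.Dict.get?_insert] at hv
        by_cases hcc : c = ci
        · rw [if_pos hcc] at hv
          injection hv with h
          omega
        · rw [if_neg hcc] at hv
          exact hvp c v hv
      · intro w hw
        obtain ⟨⟨c, hcne, hcw⟩, hubw⟩ := hv2S w hw
        refine ⟨⟨c, hcne, ?_⟩, ?_⟩
        · rw [PySem.Dict.get?_insert, if_neg hcne]
          exact hcw
        · intro c' v hcne' hv
          rw [PySem.Dict.get?_insert, if_neg hcne'] at hv
          exact hubw c' v hcne' hv
      · intro hn c hcne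
        rw [PySem.Dict.get?_insert, if_neg hcne]
        exact hv2N hn c hcne
    · rw [if_neg hc1e]
      have hc1i : c1 ≠ ci := fun h => hc1e h.symm
      by_cases hgv1 : cur > v1
      · rw [if_pos hgv1]
        dsimp only
        refine ⟨hclsS' hub_ci, hclsN', ?_, ?_, ?_, ?_⟩
        · rw [PySem.Dict.get?_insert_self]
        · intro c v hv
          rw [PySem.Dict.get?_insert] at hv
          by_cases hcc : c = ci
          · rw [if_pos hcc] at hv
            injection hv with h
            omega
          · rw [if_neg hcc] at hv
            have := hv1 c v hv
            omega
        · intro w hw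
          injection hw with h
          subst h
          refine ⟨⟨c1, hc1i, by rw [PySem.Dict.get?_insert, if_neg hc1i]; exact hc1⟩, ?_⟩
          intro c v hcne hv
          rw [PySem.Dict.get?_insert, if_neg hcne] at hv
          exact hv1 c v hv
        · intro h
          simp at h
      · rw [if_neg hgv1]
        have hcv1 : cur ≤ v1 := by omega
        rcases v2 with _ | w
        · simp only [Option.elim_none]
          refine ⟨hclsS' hub_ci, hclsN', ?_, ?_, ?_, ?_⟩
          · rw [PySem.Dict.get?_insert, if_neg hc1i]
            exact hc1
          · intro c v hv
            rw [PySem.Dict.get?_insert] at hv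
            by_cases hcc : c = ci
            · rw [if_pos hcc] at hv
              injection hv with h
              omega
            · rw [if_neg hcc] at hv
              exact hv1 c v hv
          · intro w' hw'
            injection hw' with h
            subst h
            refine ⟨⟨ci, hc1e, by rw [PySem.Dict.get?_insert_self]⟩, ?_⟩
            intro c v hcne hv
            rw [PySem.Dict.get?_insert] at hv
            by_cases hcc : c = ci
            · rw [if_pos hcc] at hv
              injection hv with h
              omega
            · rw [if_neg hcc] at hv
              have := hv2N rfl c hcne
              rw [this] at hv
              simp at hv
          · intro h
            simp at h
        · simp only [Option.elim_some]
          refine ⟨hclsS' hub_ci, hclsN', ?_, ?_, ?_, ?_⟩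
          · rw [PySem.Dict.get?_insert, if_neg hc1i]
            exact hc1
          · intro c v hv
            rw [PySem.Dict.get?_insert] at hv
            by_cases hcc : c = ci
            · rw [if_pos hcc] at hv
              injection hv with h
              omega
            · rw [if_neg hcc] at hv
              exact hv1 c v hv
          · intro w' hw'
            injection hw' with h
            subst h
            by_cases hcw : cur > w
            · rw [if_pos hcw]
              refine ⟨⟨ci, hc1e, by rw [PySem.Dict.get?_insert_self]⟩, ?_⟩
              intro c v hcne hv
              rw [PySem.Dict.get?_insert] at hv
              by_cases hcc : c = ci
              · rw [if_pos hcc] at hv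
                injection hv with h
                omega
              · rw [if_neg hcc] at hv
                have := (hv2S w rfl).2 c v hcne hv
                omega
            · rw [if_neg hcw]
              obtain ⟨⟨c, hcne, hcw'⟩, hubw⟩ := hv2S w rfl
              have hcci : c ≠ ci := by
                intro hh
                rw [hh] at hcw'
                have := hci_lt w hcw'
                omega
              refine ⟨⟨c, hcne, by rw [PySem.Dict.get?_insert, if_neg hcci]; exact hcw'⟩, ?_⟩
              intro c' v hcne' hv
              rw [PySem.Dict.get?_insert] at hv
              by_cases hcc : c' = ci
              · rw [if_pos hcc] at hv
                injection hv with h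
                omega
              · rw [if_neg hcc] at hv
                exact hubw c' v hcne' hv
          · intro h
            simp at h
  rcases hget : cm.get? ci with _ | o
  · exact main_ins (by rw [hget]; rfl)
      (fun j h0 hk hcj => absurd hcj (hclsN ci hget j h0 hk))
      (fun o' h => by rw [hget] at h; simp at h)
  · by_cases hlt : cur > o
    · exact main_ins (by rw [hget]; simp [hlt])
        (fun j h0 hk hcj => le_trans ((hclsS ci o hget).2 j h0 hk hcj) hlt.le)
        (fun o' h => by rw [hget] at h; injection h with h'; omega)
    · have hr : pobuTop cm c1 v1 v2 ci cur = (cm, c1, v1, v2) := by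
        unfold pobuTop
        rw [hget]
        simp [hlt]
      rw [hr]
      dsimp only
      refine ⟨?_, ?_, hc1, hv1, hv2S, hv2N⟩
      · intro c v hv
        obtain ⟨⟨j, hj0, hjk, hcj, hmj⟩, hubold⟩ := hclsS c v hv
        refine ⟨⟨j, hj0, by omega, hcj, by rw [hkeep j hj0 hjk]; exact hmj⟩, ?_⟩
        intro j hj0 hjk1 hcj
        rcases (by omega : j ≤ (k:Int) ∨ j = (k:Int) + 1) with hj | hj
        · rw [hkeep j hj0 hj]
          exact hubold j hj0 hj hcj
        · rw [hj, hnewv]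
          have hc_ci : c = ci := by
            rw [hj, hciC] at hcj
            exact hcj.symm
          rw [hc_ci] at hv
          rw [hget] at hv
          injection hv with hv'
          omega
      · intro c hnone j hj0 hjk
        rcases (by omega : j ≤ (k:Int) ∨ j = (k:Int) + 1) with hj | hj
        · exact hclsN c hnone j hj0 hj
        · rw [hj, hciC]
          intro hcic
          rw [← hcic] at hnone
          rw [hget] at hnone
          simp at hnone

lemma pobu_base_components (k : Nat) (memo : List Int) (prev cur : Int)
    (hlen : memo.length = k + 1) (hprev : prev = PySem.List.pyGetD memo (k:Int) 0)
    (hmono : ∀ j : Int, 0 ≤ j → j ≤ (k:Int) → PySem.List.pyGetD memo j 0 ≤ prev)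
    (hpc : prev ≤ cur) :
    (memo ++ [cur]).length = (k + 1) + 1 ∧
    cur = PySem.List.pyGetD (memo ++ [cur]) ((k:Int) + 1) 0 ∧
    (∀ j : Int, 0 ≤ j → j ≤ (k:Int) + 1 → PySem.List.pyGetD (memo ++ [cur]) j 0 ≤ cur) := by
  have hnewv : PySem.List.pyGetD (memo ++ [cur]) ((k:Int) + 1) 0 = cur := by
    have h2 : ((k:Int) + 1) = ((memo.length : Nat) : Int) := by omega
    rw [h2, pyGetD_append_last]
  refine ⟨by simp [hlen], hnewv.symm, ?_⟩
  intro j hj0 hjk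
  rcases (by omega : j ≤ (k:Int) ∨ j = (k:Int) + 1) with hj | hj
  · rw [pyGetD_append_keep memo [cur] j hj0 (by omega)]
    exact le_trans (hmono j hj0 hj) hpc
  · rw [hj, hnewv]

def pobuSA (T C : List Int) (Aco Bco : Int) (k : Nat) : List Int × List Int :=
  (PySem.List.pyRange 1 ((k : Int) + 1) 1).foldl (pobuStepA T C Aco Bco)
    ([Bco * PySem.List.pyGetD T 0 0], [0])

def pobuSB (T C : List Int) (Aco Bco : Int) (k : Nat) :
    Int × List Int × PySem.Dict Int Int × Int × Int × Option Int :=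
  (PySem.List.pyRange 1 ((k : Int) + 1) 1).foldl (pobuStepB T C Aco Bco)
    (Bco * PySem.List.pyGetD T 0 0, [0],
     ((PySem.Dict.empty : PySem.Dict Int Int).insert (PySem.List.pyGetD C 0 0)
       (Bco * PySem.List.pyGetD T 0 0)),
     PySem.List.pyGetD C 0 0, Bco * PySem.List.pyGetD T 0 0, none)

lemma pobuSA_succ (T C : List Int) (Aco Bco : Int) (k : Nat) :
    pobuSA T C Aco Bco (k + 1) = pobuStepA T C Aco Bco (pobuSA T C Aco Bco k) ((k:Int) + 1) := by
  unfold pobuSA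
  rw [show (((k + 1 : Nat) : Int) + 1) = ((k:Int) + 1) + 1 from by push_cast; ring]
  rw [PySem.List.pyRange_one_succ_right (by omega), List.foldl_append, List.foldl_cons,
    List.foldl_nil]

lemma pobuSB_succ (T C : List Int) (Aco Bco : Int) (k : Nat) :
    pobuSB T C Aco Bco (k + 1) = pobuStepB T C Aco Bco (pobuSB T C Aco Bco k) ((k:Int) + 1) := by
  unfold pobuSB
  rw [show (((k + 1 : Nat) : Int) + 1) = ((k:Int) + 1) + 1 from by push_cast; ring]
  rw [PySem.List.pyRange_one_succ_right (by omega), List.foldl_append, List.foldl_cons,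
    List.foldl_nil]

lemma pobu_inv_zero (T C : List Int) (Aco Bco : Int) :
    pobuInv C 0 (pobuSA T C Aco Bco 0) (pobuSB T C Aco Bco 0) := by
  have hA : pobuSA T C Aco Bco 0 = ([Bco * PySem.List.pyGetD T 0 0], [0]) := by
    unfold pobuSA
    rw [PySem.List.pyRange_one_eq_nil (by simp)]
    rfl
  have hB : pobuSB T C Aco Bco 0 = (Bco * PySem.List.pyGetD T 0 0, [0],
      ((PySem.Dict.empty : PySem.Dict Int Int).insert (PySem.List.pyGetD C 0 0)
        (Bco * PySem.List.pyGetD T 0 0)),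
      PySem.List.pyGetD C 0 0, Bco * PySem.List.pyGetD T 0 0, none) := by
    unfold pobuSB
    rw [PySem.List.pyRange_one_eq_nil (by simp)]
    rfl
  rw [hA, hB]
  unfold pobuInv
  dsimp only
  refine ⟨rfl, rfl, ?_, ?_, ?_, ?_, ?_, ?_, ?_, ?_⟩
  · simp [PySem.List.pyGetD_zero_cons]
  · intro j hj0 hjk
    have hj : j = 0 := by omega
    subst hj
    simp [PySem.List.pyGetD_zero_cons]
  · intro c v hv
    rw [PySem.Dict.get?_insert] at hv
    by_cases hcc : c = PySem.List.pyGetD C 0 0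
    · rw [if_pos hcc] at hv
      injection hv with h
      refine ⟨⟨0, le_refl _, by simp, hcc.symm, by simp [PySem.List.pyGetD_zero_cons, h]⟩, ?_⟩
      intro j hj0 hjk _
      have hj : j = 0 := by omega
      subst hj
      simp [PySem.List.pyGetD_zero_cons, h]
    · rw [if_neg hcc, PySem.Dict.get?_empty] at hv
      simp at hv
  · intro c hnone j hj0 hjk
    have hj : j = 0 := by omega
    subst hj
    rw [PySem.Dict.get?_insert] at hnone
    by_cases hcc : c = PySem.List.pyGetD C 0 0
    · rw [if_pos hcc] at hnone
      exact absurd hnone (by simp)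
    · exact fun h => hcc h.symm
  · rw [PySem.Dict.get?_insert_self]
  · intro c v hv
    rw [PySem.Dict.get?_insert] at hv
    by_cases hcc : c = PySem.List.pyGetD C 0 0
    · rw [if_pos hcc] at hv
      injection hv with h
      omega
    · rw [if_neg hcc, PySem.Dict.get?_empty] at hv
      simp at hv
  · intro w hw
    simp at hw
  · intro _ c hcne
    rw [PySem.Dict.get?_insert, if_neg hcne, PySem.Dict.get?_empty]

lemma pobu_step (T C : List Int) (Aco Bco : Int) (k : Nat)
    (sa : List Int × List Int) (sb : Int × List Int × PySem.Dict Int Int × Int × Int × Option Int)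
    (h : pobuInv C k sa sb) :
    pobuInv C (k + 1) (pobuStepA T C Aco Bco sa ((k:Int) + 1))
      (pobuStepB T C Aco Bco sb ((k:Int) + 1)) := by
  obtain ⟨memo, indA⟩ := sa
  obtain ⟨prev, indB, cm, c1, v1, v2⟩ := sb
  unfold pobuInv at h
  dsimp only at h
  obtain ⟨hlen, hind, hprev, hmono, hclsS, hclsN, hc1, hv1, hv2S, hv2N⟩ := h
  obtain ⟨cv, hcveq, hub, j₀, hj₀0, hj₀k, hj₀eq⟩ :=
    pobu_cand_spec C memo Aco Bco k cm c1 v1 v2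
      (PySem.List.pyGetD C ((k:Int) + 1) 0) (PySem.List.pyGetD T ((k:Int) + 1) 0)
      hclsS hclsN hc1 hv1 hv2S hv2N
  have hIE := pobu_inner_eq T C memo Aco Bco ((k:Int) + 1) prev
  by_cases hgt : cv > prev
  · have hsne : (pobuInner T C memo Aco Bco ((k:Int) + 1) prev).2 ≠ -1 := by
      rw [ne_eq, hIE.2]
      intro hall
      have := hall j₀ (PySem.List.mem_pyRange_one.mpr ⟨hj₀0, by omega⟩)
      rw [hj₀eq] at this
      omega
    have hfst : (pobuInner T C memo Aco Bco ((k:Int) + 1) prev).1 = cv := by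
      rw [hIE.1]
      apply pobu_foldl_max_eq _ _ _ (le_of_lt hgt)
      · intro y hy
        obtain ⟨j, hj, rfl⟩ := List.mem_map.mp hy
        obtain ⟨hjl, hjr⟩ := PySem.List.mem_pyRange_one.mp hj
        exact hub j hjl (by omega)
      · exact Or.inr (List.mem_map.mpr ⟨j₀, PySem.List.mem_pyRange_one.mpr ⟨hj₀0, by omega⟩, hj₀eq⟩)
    have hA : pobuStepA T C Aco Bco (memo, indA) ((k:Int) + 1)
        = (memo ++ [cv], indA ++ [(k:Int) + 1]) := by
      unfold pobuStepA
      dsimp only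
      rw [show ((k:Int) + 1 - 1) = (k:Int) from by ring, ← hprev, if_pos hsne, hfst]
    have hB : pobuStepB T C Aco Bco (prev, indB, cm, c1, v1, v2) ((k:Int) + 1)
        = (cv, indB ++ [(k:Int) + 1],
           pobuTop cm c1 v1 v2 (PySem.List.pyGetD C ((k:Int) + 1) 0) cv) := by
      unfold pobuStepB
      dsimp only
      rw [hcveq]
      dsimp only
      simp only [if_pos hgt]
    rw [hA, hB]
    unfold pobuInv
    dsimp only
    push_cast
    obtain ⟨hl', hp', hm'⟩ := pobu_base_components k memo prev cv hlen hprev hmono (le_of_lt hgt)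
    refine ⟨by simpa using hl', by rw [hind], hp', hm', ?_⟩
    exact pobu_top_spec C memo cm c1 v1 v2 _ cv k prev hlen hmono hclsS hclsN hc1 hv1 hv2S hv2N
      (le_of_lt hgt) rfl
  · have hseq : (pobuInner T C memo Aco Bco ((k:Int) + 1) prev).2 = -1 := by
      rw [hIE.2]
      intro j hj
      obtain ⟨hjl, hjr⟩ := PySem.List.mem_pyRange_one.mp hj
      have := hub j hjl (by omega)
      omega
    have hA : pobuStepA T C Aco Bco (memo, indA) ((k:Int) + 1) = (memo ++ [prev], indA) := by
      unfold pobuStepA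
      dsimp only
      rw [show ((k:Int) + 1 - 1) = (k:Int) from by ring, ← hprev, if_neg (by simp [hseq])]
    have hB : pobuStepB T C Aco Bco (prev, indB, cm, c1, v1, v2) ((k:Int) + 1)
        = (prev, indB, pobuTop cm c1 v1 v2 (PySem.List.pyGetD C ((k:Int) + 1) 0) prev) := by
      unfold pobuStepB
      dsimp only
      rw [hcveq]
      dsimp only
      simp only [if_neg hgt]
    rw [hA, hB]
    unfold pobuInv
    dsimp only
    push_cast
    obtain ⟨hl', hp', hm'⟩ := pobu_base_components k memo prev prev hlen hprev hmono (le_refl _)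
    refine ⟨by simpa using hl', hind, hp', hm', ?_⟩
    exact pobu_top_spec C memo cm c1 v1 v2 _ prev k prev hlen hmono hclsS hclsN hc1 hv1 hv2S hv2N
      (le_refl _) rfl

lemma pobu_inv_all (T C : List Int) (Aco Bco : Int) (k : Nat) :
    pobuInv C k (pobuSA T C Aco Bco k) (pobuSB T C Aco Bco k) := by
  induction k with
  | zero => exact pobu_inv_zero T C Aco Bco
  | succ k ih =>
    rw [pobuSA_succ, pobuSB_succ]
    exact pobu_step T C Aco Bco k _ _ ih

-- ===== VERDICT (by name: the statement is the Claim_ definition above) =====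
theorem parcours_optimal_bottom_up_spec : Claim_equal_parcours_optimal_bottom_up := by
  intro T C Aco Bco hdom hpre
  obtain ⟨hT, hC⟩ := hpre
  have hlen1 : 1 ≤ T.length := by
    have := List.length_pos_iff.mpr hT
    omega
  unfold Spec_parcours_optimal_bottom_up
  unfold parcours_optimal_bottom_up parcours_optimal_bottom_up_alt
  rw [show PySem.List.len T = (((T.length - 1 : Nat) : Int) + 1) from by
    rw [PySem.List.len_eq]; omega]
  have hinv := pobu_inv_all T C Aco Bco (T.length - 1)
  unfold pobuInv at hinv
  obtain ⟨hlen, hind, hprev, -⟩ := hinv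
  show (PySem.List.pyGetD (pobuSA T C Aco Bco (T.length - 1)).1 (-1) 0,
        (pobuSA T C Aco Bco (T.length - 1)).2)
      = ((pobuSB T C Aco Bco (T.length - 1)).1, (pobuSB T C Aco Bco (T.length - 1)).2.1)
  have hne : (pobuSA T C Aco Bco (T.length - 1)).1 ≠ [] := by
    intro h
    rw [h] at hlen
    simp at hlen
  simp only [Prod.mk.injEq]
  refine ⟨?_, hind⟩
  rw [PySem.List.pyGetD_neg_one _ _ hne, hprev, PySem.List.pyGetD_natCast]
  have hk : T.length - 1 < (pobuSA T C Aco Bco (T.length - 1)).1.length := by omega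
  rw [List.getLast_eq_getElem, List.getD_eq_getElem?_getD, List.getElem?_eq_getElem hk]
  simp only [Option.getD_some]
  congr 1
  omega
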